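-- pv_equiv track=rewrite | github.com/RizaneEves/AI-MP2 | Utilities.py | isAssignmentValid
-- ===== SOURCE A (Python) =====
-- def isAssignmentValid(assignment, sources):
--     for x in range(len(assignment)):
--         for y in range(len(assignment[0])):
--             countSameColorNeighs = countSameColorNeighbors(x, y, assignment)
--             if (x,y) in sources:
--                 if(countSameColorNeighs != 1):
--                     return False
--             else:
--                 if(countSameColorNeighs != 2):
--                     return False
--     return True
--
-- def countSameColorNeighbors(x, y, assignment):
--     count = 0
--     neighbors = getValidNeighbors(x, y, assignment)
--     for neighbor in neighbors:
--         neighborX = neighbor[0]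
--         neighborY = neighbor[1]
--         if(assignment[neighborX][neighborY] == assignment[x][y]):
--             count += 1
--     return count
--
-- def getValidNeighbors(x,y, assignment):
--     array = [(x - 1, y), (x + 1, y), (x, y - 1), (x, y + 1)]
--     validNeighbors = []
--     cols = len(assignment)
--     rows = len(assignment[0])
--     for neighbor in array:
--         x = neighbor[0]
--         y = neighbor[1]
--         if x >= 0 and y >= 0 and x < cols and y < rows:
--             validNeighbors.append(neighbor)
--     return validNeighbors
-- ===== SOURCE B (Python) =====
-- def isAssignmentValid(assignment, sources):
--     if not assignment:
--         return True
--     rows = len(assignment)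
--     cols = len(assignment[0])
--     counts = {}
--     for x in range(rows):
--         for y in range(cols):
--             if y + 1 < cols and assignment[x][y] == assignment[x][y + 1]:
--                 for c in ((x, y), (x, y + 1)):
--                     counts[c] = counts.get(c, 0) + 1
--             if x + 1 < rows and assignment[x][y] == assignment[x + 1][y]:
--                 for c in ((x, y), (x + 1, y)):
--                     counts[c] = counts.get(c, 0) + 1
--     srcs = set(sources)
--     for x in range(rows):
--         for y in range(cols):
--             if counts.get((x, y), 0) != (1 if (x, y) in srcs else 2):
--                 return False
--     return True
-- ===== Notes on version B (the rewrite author's own statement) =====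
-- stated objective: alternative
-- what changed: Replaces per-cell recomputation of the 4-neighbor list and a linear 'in sources' scan by one symmetric edge pass (right/down edges, both endpoints bumped in a dict counter) followed by a validation pass against a set of sources.
-- outside the precondition, e.g. on isAssignmentValid([[1, 2], [3]], set()): A returns False, B raises IndexError
import Mathlib
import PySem

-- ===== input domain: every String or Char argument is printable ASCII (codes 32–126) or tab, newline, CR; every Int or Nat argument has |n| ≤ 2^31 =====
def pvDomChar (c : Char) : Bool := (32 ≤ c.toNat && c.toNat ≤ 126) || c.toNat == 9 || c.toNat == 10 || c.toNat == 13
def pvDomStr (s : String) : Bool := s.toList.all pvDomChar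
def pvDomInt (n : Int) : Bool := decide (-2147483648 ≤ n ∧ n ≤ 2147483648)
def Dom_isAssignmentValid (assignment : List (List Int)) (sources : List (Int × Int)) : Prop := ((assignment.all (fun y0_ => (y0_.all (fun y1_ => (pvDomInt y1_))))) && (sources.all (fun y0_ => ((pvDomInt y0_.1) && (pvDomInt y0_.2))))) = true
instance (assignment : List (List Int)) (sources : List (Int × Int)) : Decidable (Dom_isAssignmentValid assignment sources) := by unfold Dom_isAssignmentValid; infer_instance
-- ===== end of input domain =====

-- B replaces A's per-cell neighbor recount by one symmetric edge pass into a dict counter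
-- plus a validation pass; return-value equivalence is proved on non-ragged grids (Pre_).

-- ===== PORT A =====
-- assignment[i][j]; in range whenever used under Pre_ (the .getD defaults are never hit there)
def pvCell (assignment : List (List Int)) (i j : Int) : Int :=
  PySem.List.pyGetD (PySem.List.pyGetD assignment i []) j 0

def getValidNeighbors (x y : Int) (assignment : List (List Int)) : List (Int × Int) :=
  let array : List (Int × Int) := [(x - 1, y), (x + 1, y), (x, y - 1), (x, y + 1)]
  let cols : Int := assignment.length
  let rows : Int := (assignment.headD []).length  -- len(assignment[0]); only called with assignment ≠ []
  array.foldl (fun validNeighbors n =>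
    if 0 ≤ n.1 ∧ 0 ≤ n.2 ∧ n.1 < cols ∧ n.2 < rows then validNeighbors ++ [n] else validNeighbors) []

def countSameColorNeighbors (x y : Int) (assignment : List (List Int)) : Int :=
  (getValidNeighbors x y assignment).foldl
    (fun count n => if pvCell assignment n.1 n.2 == pvCell assignment x y then count + 1 else count) 0

def isAssignmentValid (assignment : List (List Int)) (sources : List (Int × Int)) : Bool :=
  -- nested for with early 'return False' = .all over the two ranges
  (PySem.List.pyRange 0 assignment.length 1).all (fun x =>
    (PySem.List.pyRange 0 ((assignment.headD []).length) 1).all (fun y =>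
      let c := countSameColorNeighbors x y assignment
      if (x, y) ∈ sources then c == 1 else c == 2))

-- ===== PORT B =====
def pvBump (d : PySem.Dict (Int × Int) Int) (c : Int × Int) : PySem.Dict (Int × Int) Int :=
  d.insert c (d.getD c 0 + 1)   -- counts[c] = counts.get(c, 0) + 1

def isAssignmentValid_alt (assignment : List (List Int)) (sources : List (Int × Int)) : Bool :=
  if assignment = [] then true
  else
    let rows : Int := assignment.length
    let cols : Int := (assignment.headD []).length
    let counts : PySem.Dict (Int × Int) Int :=
      (PySem.List.pyRange 0 rows 1).foldl (fun d x =>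
        (PySem.List.pyRange 0 cols 1).foldl (fun d y =>
          let d1 := if y + 1 < cols ∧ pvCell assignment x y = pvCell assignment x (y + 1)
                    then ([(x, y), (x, y + 1)] : List (Int × Int)).foldl pvBump d else d
          if x + 1 < rows ∧ pvCell assignment x y = pvCell assignment (x + 1) y
          then ([(x, y), (x + 1, y)] : List (Int × Int)).foldl pvBump d1 else d1) d)
        PySem.Dict.empty
    let srcs : PySem.Set (Int × Int) := PySem.Set.ofList sources
    (PySem.List.pyRange 0 rows 1).all (fun x =>
      (PySem.List.pyRange 0 cols 1).all (fun y =>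
        counts.getD (x, y) 0 == (if PySem.Set.contains srcs (x, y) then 1 else 2)))

-- ===== PRECONDITION & SPEC =====
-- Pre_ excludes ragged grids (some row shorter than row 0): there A either raises IndexError
-- or early-returns an accidental value before reaching the short row, while B indexes the full rectangle.
def Pre_isAssignmentValid (assignment : List (List Int)) (sources : List (Int × Int)) : Prop :=
  ∀ row ∈ assignment, (assignment.headD []).length ≤ row.length
instance (assignment : List (List Int)) (sources : List (Int × Int)) : Decidable (Pre_isAssignmentValid assignment sources) := by unfold Pre_isAssignmentValid; infer_instance

def pvWitness_isAssignmentValid : List (List Int) × (List (Int × Int)) :=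
  ([[1, 1], [1, 2]], [(1, 1)])

def Spec_isAssignmentValid (assignment : List (List Int)) (sources : List (Int × Int)) (out : Bool) : Prop := out = isAssignmentValid_alt assignment sources
instance (assignment : List (List Int)) (sources : List (Int × Int)) (out : Bool) : Decidable (Spec_isAssignmentValid assignment sources out) := by unfold Spec_isAssignmentValid; infer_instance

-- ===== CLAIM (what is proved, stated in full; the proofs are below) =====
def Claim_equal_isAssignmentValid : Prop := ∀ (assignment : List (List Int)) (sources : List (Int × Int)), Dom_isAssignmentValid assignment sources → Pre_isAssignmentValid assignment sources → Spec_isAssignmentValid assignment sources (isAssignmentValid assignment sources)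


-- ===== LEMMAS AND PROOFS =====

lemma pvAllCongr {α : Type} (l : List α) (f g : α → Bool) (h : ∀ x ∈ l, f x = g x) :
    l.all f = l.all g := by
  induction l with
  | nil => rfl
  | cons a t ih =>
    simp only [List.all_cons, h a (by simp),
      ih (fun x hx => h x (List.mem_cons_of_mem _ hx))]

lemma pvFoldlExt {α β : Type} (l : List α) (f g : β → α → β) (d : β)
    (h : ∀ d x, f d x = g d x) : l.foldl f d = l.foldl g d := by
  have hfg : f = g := funext fun d => funext fun x => h d x
  rw [hfg]

lemma pvFoldlFlatMap {α β γ : Type} (l : List α) (g : α → List β) (f : γ → β → γ) (d : γ) :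
    (l.flatMap g).foldl f d = l.foldl (fun d x => (g x).foldl f d) d := by
  induction l generalizing d with
  | nil => rfl
  | cons a t ih => simp [List.flatMap_cons, List.foldl_append, ih]

lemma pvCountFlatMapSingle {α β : Type} [DecidableEq α] [BEq β] [LawfulBEq β]
    (l : List α) (g : α → List β) (b : β) (k : α)
    (h : ∀ a ∈ l, a ≠ k → b ∉ g a) (hnd : l.Nodup) :
    (l.flatMap g).count b = if k ∈ l then (g k).count b else 0 := by
  induction l with
  | nil => simp
  | cons a t ih =>
    rcases List.nodup_cons.mp hnd with ⟨hat, hnt⟩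
    have ht := ih (fun x hx => h x (List.mem_cons_of_mem _ hx)) hnt
    rw [List.flatMap_cons, List.count_append, ht]
    by_cases hak : a = k
    · subst hak
      rw [if_neg hat, if_pos (by simp : a ∈ a :: t)]
      omega
    · have hb : b ∉ g a := h a (by simp) hak
      have hmem : (k ∈ a :: t) ↔ k ∈ t := by
        rw [List.mem_cons]
        exact or_iff_right (fun hh => hak hh.symm)
      rw [List.count_eq_zero.mpr hb, if_congr hmem rfl rfl]
      omega

lemma pvCountFlatMapPair {α β : Type} [DecidableEq α] [BEq β] [LawfulBEq β]
    (l : List α) (g : α → List β) (b : β) (k1 k2 : α) (hk : k1 ≠ k2)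
    (h : ∀ a ∈ l, a ≠ k1 → a ≠ k2 → b ∉ g a) (hnd : l.Nodup) :
    (l.flatMap g).count b
      = (if k1 ∈ l then (g k1).count b else 0) + (if k2 ∈ l then (g k2).count b else 0) := by
  induction l with
  | nil => simp
  | cons a t ih =>
    rcases List.nodup_cons.mp hnd with ⟨hat, hnt⟩
    have ht := ih (fun x hx => h x (List.mem_cons_of_mem _ hx)) hnt
    rw [List.flatMap_cons, List.count_append, ht]
    by_cases h1 : a = k1
    · subst h1
      have hk2 : (k2 ∈ a :: t) ↔ k2 ∈ t := by
        rw [List.mem_cons]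
        exact or_iff_right (fun hh => hk hh.symm)
      rw [if_neg hat, if_pos (by simp : a ∈ a :: t), if_congr hk2 rfl rfl]
      omega
    · by_cases h2 : a = k2
      · subst h2
        have hk1 : (k1 ∈ a :: t) ↔ k1 ∈ t := by
          rw [List.mem_cons]
          exact or_iff_right (fun hh => h1 hh.symm)
        rw [if_neg hat, if_pos (by simp : a ∈ a :: t), if_congr hk1 rfl rfl]
        omega
      · have hb : b ∉ g a := h a (by simp) h1 h2
        have hm1 : (k1 ∈ a :: t) ↔ k1 ∈ t := by
          rw [List.mem_cons]
          exact or_iff_right (fun hh => h1 hh.symm)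
        have hm2 : (k2 ∈ a :: t) ↔ k2 ∈ t := by
          rw [List.mem_cons]
          exact or_iff_right (fun hh => h2 hh.symm)
        rw [List.count_eq_zero.mpr hb, if_congr hm1 rfl rfl, if_congr hm2 rfl rfl]
        omega

lemma pvIteAndEqComm (P : Prop) [Decidable P] (r s : Int) :
    (if P ∧ r = s then (1 : Int) else 0) = if P ∧ s = r then 1 else 0 := by
  refine if_congr ?_ rfl rfl
  constructor <;> rintro ⟨hP, he⟩ <;> exact ⟨hP, he.symm⟩

-- the edge list that B's counting loop effectively counts ---------------

def pvTargets (a : List (List Int)) (rows cols u v : Int) : List (Int × Int) :=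
  (if v + 1 < cols ∧ pvCell a u v = pvCell a u (v + 1) then [(u, v), (u, v + 1)] else []) ++
  (if u + 1 < rows ∧ pvCell a u v = pvCell a (u + 1) v then [(u, v), (u + 1, v)] else [])

def pvRowL (a : List (List Int)) (rows cols u : Int) : List (Int × Int) :=
  (PySem.List.pyRange 0 cols 1).flatMap (pvTargets a rows cols u)

def pvBigL (a : List (List Int)) (rows cols : Int) : List (Int × Int) :=
  (PySem.List.pyRange 0 rows 1).flatMap (pvRowL a rows cols)

lemma pvMemTargets {a : List (List Int)} {rows cols u v : Int} {p : Int × Int}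
    (h : p ∈ pvTargets a rows cols u v) :
    p = (u, v) ∨ p = (u, v + 1) ∨ p = (u + 1, v) := by
  unfold pvTargets at h
  rcases List.mem_append.mp h with h | h <;> split_ifs at h <;> simp at h <;> tauto

lemma pvCountTargetsSelf (a : List (List Int)) (rows cols x y : Int) :
    (pvTargets a rows cols x y).count (x, y) =
      (if y + 1 < cols ∧ pvCell a x y = pvCell a x (y + 1) then 1 else 0) +
      (if x + 1 < rows ∧ pvCell a x y = pvCell a (x + 1) y then 1 else 0) := by
  unfold pvTargets
  split_ifs <;>
    simp [List.count_append, List.count_cons, Prod.ext_iff] <;>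
    omega

lemma pvCountTargetsLeft (a : List (List Int)) (rows cols x y : Int) (hy : y < cols) :
    (pvTargets a rows cols x (y - 1)).count (x, y) =
      if pvCell a x (y - 1) = pvCell a x y then 1 else 0 := by
  have h1 : y - 1 + 1 = y := by ring
  unfold pvTargets
  rw [h1]
  split_ifs <;>
    simp_all [List.count_append, List.count_cons, Prod.ext_iff] <;>
    omega

lemma pvCountTargetsUp (a : List (List Int)) (rows cols x y : Int) (hx : x < rows) :
    (pvTargets a rows cols (x - 1) y).count (x, y) =
      if pvCell a (x - 1) y = pvCell a x y then 1 else 0 := by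
  have h1 : x - 1 + 1 = x := by ring
  unfold pvTargets
  rw [h1]
  split_ifs <;>
    simp_all [List.count_append, List.count_cons, Prod.ext_iff] <;>
    omega

lemma pvCountRowSelf (a : List (List Int)) (rows cols x y : Int)
    (h0y : 0 ≤ y) (hy : y < cols) :
    (pvRowL a rows cols x).count (x, y) =
      (if 0 ≤ y - 1 ∧ pvCell a x (y - 1) = pvCell a x y then 1 else 0) +
      ((if y + 1 < cols ∧ pvCell a x y = pvCell a x (y + 1) then 1 else 0) +
       (if x + 1 < rows ∧ pvCell a x y = pvCell a (x + 1) y then 1 else 0)) := by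
  unfold pvRowL
  rw [pvCountFlatMapPair _ _ _ (y - 1) y (by omega)
      (by
        intro v hv hv1 hv2 hmem
        rcases pvMemTargets hmem with h | h | h <;>
          (rw [Prod.ext_iff] at h; omega))
      (PySem.List.nodup_pyRange_one 0 cols)]
  have hm1 : ((y - 1) ∈ PySem.List.pyRange 0 cols 1) ↔ (0 ≤ y - 1) := by
    rw [PySem.List.mem_pyRange_one]; omega
  have hm2 : (y ∈ PySem.List.pyRange 0 cols 1) := by
    rw [PySem.List.mem_pyRange_one]; omega
  rw [if_congr hm1 rfl rfl, if_pos hm2,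
      pvCountTargetsLeft a rows cols x y hy, pvCountTargetsSelf]
  by_cases h1 : 0 ≤ y - 1 <;>
    by_cases h2 : pvCell a x (y - 1) = pvCell a x y <;>
    simp [h1, h2]

lemma pvCountRowUp (a : List (List Int)) (rows cols x y : Int)
    (hx : x < rows) (h0y : 0 ≤ y) (hy : y < cols) :
    (pvRowL a rows cols (x - 1)).count (x, y) =
      if pvCell a (x - 1) y = pvCell a x y then 1 else 0 := by
  unfold pvRowL
  rw [pvCountFlatMapSingle _ _ _ y
      (by
        intro v hv hvne hmem
        rcases pvMemTargets hmem with h | h | h <;>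
          (rw [Prod.ext_iff] at h; omega))
      (PySem.List.nodup_pyRange_one 0 cols)]
  have hm : (y ∈ PySem.List.pyRange 0 cols 1) := by
    rw [PySem.List.mem_pyRange_one]; omega
  rw [if_pos hm, pvCountTargetsUp a rows cols x y hx]

lemma pvCountBig (a : List (List Int)) (rows cols x y : Int)
    (h0x : 0 ≤ x) (hx : x < rows) (h0y : 0 ≤ y) (hy : y < cols) :
    (pvBigL a rows cols).count (x, y) =
      (if 0 ≤ x - 1 ∧ pvCell a (x - 1) y = pvCell a x y then 1 else 0) +
      ((if 0 ≤ y - 1 ∧ pvCell a x (y - 1) = pvCell a x y then 1 else 0) +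
       ((if y + 1 < cols ∧ pvCell a x y = pvCell a x (y + 1) then 1 else 0) +
        (if x + 1 < rows ∧ pvCell a x y = pvCell a (x + 1) y then 1 else 0))) := by
  unfold pvBigL
  rw [pvCountFlatMapPair _ _ _ (x - 1) x (by omega)
      (by
        intro u hu hu1 hu2 hmem
        rcases List.mem_flatMap.mp hmem with ⟨v, hv, hmemv⟩
        rcases pvMemTargets hmemv with h | h | h <;>
          (rw [Prod.ext_iff] at h; omega))
      (PySem.List.nodup_pyRange_one 0 rows)]
  have hm1 : ((x - 1) ∈ PySem.List.pyRange 0 rows 1) ↔ (0 ≤ x - 1) := by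
    rw [PySem.List.mem_pyRange_one]; omega
  have hm2 : (x ∈ PySem.List.pyRange 0 rows 1) := by
    rw [PySem.List.mem_pyRange_one]; omega
  rw [if_congr hm1 rfl rfl, if_pos hm2,
      pvCountRowUp a rows cols x y hx h0y hy,
      pvCountRowSelf a rows cols x y h0y hy]
  by_cases h1 : 0 ≤ x - 1 <;>
    by_cases h2 : pvCell a (x - 1) y = pvCell a x y <;>
    simp [h1, h2]

lemma pvCountBigInt (a : List (List Int)) (rows cols x y : Int)
    (h0x : 0 ≤ x) (hx : x < rows) (h0y : 0 ≤ y) (hy : y < cols) :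
    (((pvBigL a rows cols).count (x, y) : Nat) : Int) =
      (if 0 ≤ x - 1 ∧ pvCell a (x - 1) y = pvCell a x y then (1 : Int) else 0) +
      ((if 0 ≤ y - 1 ∧ pvCell a x (y - 1) = pvCell a x y then 1 else 0) +
       ((if y + 1 < cols ∧ pvCell a x y = pvCell a x (y + 1) then 1 else 0) +
        (if x + 1 < rows ∧ pvCell a x y = pvCell a (x + 1) y then 1 else 0))) := by
  rw [pvCountBig a rows cols x y h0x hx h0y hy]
  split_ifs <;> norm_num

-- B's nested counting loop is the insert-counter of pvBigL --------------

lemma pvCountsEq (a : List (List Int)) (rows cols : Int) :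
    ((PySem.List.pyRange 0 rows 1).foldl (fun d x =>
        (PySem.List.pyRange 0 cols 1).foldl (fun d y =>
          let d1 := if y + 1 < cols ∧ pvCell a x y = pvCell a x (y + 1)
                    then ([(x, y), (x, y + 1)] : List (Int × Int)).foldl pvBump d else d
          if x + 1 < rows ∧ pvCell a x y = pvCell a (x + 1) y
          then ([(x, y), (x + 1, y)] : List (Int × Int)).foldl pvBump d1 else d1) d)
        PySem.Dict.empty)
      = PySem.Dict.counter (pvBigL a rows cols) := by
  have hcell : ∀ (x : Int) (d : PySem.Dict (Int × Int) Int) (y : Int),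
      (let d1 := if y + 1 < cols ∧ pvCell a x y = pvCell a x (y + 1)
                 then ([(x, y), (x, y + 1)] : List (Int × Int)).foldl pvBump d else d
       if x + 1 < rows ∧ pvCell a x y = pvCell a (x + 1) y
       then ([(x, y), (x + 1, y)] : List (Int × Int)).foldl pvBump d1 else d1)
        = (pvTargets a rows cols x y).foldl pvBump d := by
    intro x d y
    unfold pvTargets
    split_ifs <;> simp [List.foldl_append]
  have hrow : ∀ (d : PySem.Dict (Int × Int) Int) (x : Int),
      ((PySem.List.pyRange 0 cols 1).foldl (fun d y =>
          let d1 := if y + 1 < cols ∧ pvCell a x y = pvCell a x (y + 1)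
                    then ([(x, y), (x, y + 1)] : List (Int × Int)).foldl pvBump d else d
          if x + 1 < rows ∧ pvCell a x y = pvCell a (x + 1) y
          then ([(x, y), (x + 1, y)] : List (Int × Int)).foldl pvBump d1 else d1) d)
        = (pvRowL a rows cols x).foldl pvBump d := by
    intro d x
    unfold pvRowL
    rw [pvFoldlFlatMap]
    exact pvFoldlExt _ _ _ _ (hcell x)
  rw [pvFoldlExt _ _ _ _ hrow]
  unfold pvBigL
  rw [← pvFoldlFlatMap]
  exact PySem.Dict.foldl_insert_getD_add_one_eq_counter _

-- A's per-cell count in closed indicator form ---------------------------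

lemma pvCountA (a : List (List Int)) (x y : Int)
    (h0x : 0 ≤ x) (hx : x < (a.length : Int)) (h0y : 0 ≤ y)
    (hy : y < ((a.headD []).length : Int)) :
    countSameColorNeighbors x y a =
      (if 0 ≤ x - 1 ∧ pvCell a (x - 1) y = pvCell a x y then (1 : Int) else 0) +
      ((if 0 ≤ y - 1 ∧ pvCell a x (y - 1) = pvCell a x y then 1 else 0) +
       ((if y + 1 < ((a.headD []).length : Int) ∧ pvCell a x (y + 1) = pvCell a x y then 1 else 0) +
        (if x + 1 < (a.length : Int) ∧ pvCell a (x + 1) y = pvCell a x y then 1 else 0))) := by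
  unfold countSameColorNeighbors getValidNeighbors
  rw [PySem.List.foldl_append_ite_eq_filter, PySem.List.foldl_if_add_one]
  simp only [List.nil_append]
  rw [List.countP_filter]
  simp only [List.countP_cons, List.countP_nil, Bool.and_eq_true,
    decide_eq_true_eq, beq_iff_eq]
  have e1 : ((pvCell a (x - 1, y).1 (x - 1, y).2 = pvCell a x y) ∧
        (0 ≤ (x - 1, y).1 ∧ 0 ≤ (x - 1, y).2 ∧ (x - 1, y).1 < (a.length : Int) ∧
          (x - 1, y).2 < ((a.headD []).length : Int)))
      ↔ (0 ≤ x - 1 ∧ pvCell a (x - 1) y = pvCell a x y) := by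
    constructor
    · rintro ⟨he, hv⟩; exact ⟨hv.1, he⟩
    · rintro ⟨h01, he⟩; exact ⟨he, h01, h0y, by omega, hy⟩
  have e2 : ((pvCell a (x + 1, y).1 (x + 1, y).2 = pvCell a x y) ∧
        (0 ≤ (x + 1, y).1 ∧ 0 ≤ (x + 1, y).2 ∧ (x + 1, y).1 < (a.length : Int) ∧
          (x + 1, y).2 < ((a.headD []).length : Int)))
      ↔ (x + 1 < (a.length : Int) ∧ pvCell a (x + 1) y = pvCell a x y) := by
    constructor
    · rintro ⟨he, hv⟩; exact ⟨hv.2.2.1, he⟩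
    · rintro ⟨h01, he⟩; exact ⟨he, by omega, h0y, h01, hy⟩
  have e3 : ((pvCell a (x, y - 1).1 (x, y - 1).2 = pvCell a x y) ∧
        (0 ≤ (x, y - 1).1 ∧ 0 ≤ (x, y - 1).2 ∧ (x, y - 1).1 < (a.length : Int) ∧
          (x, y - 1).2 < ((a.headD []).length : Int)))
      ↔ (0 ≤ y - 1 ∧ pvCell a x (y - 1) = pvCell a x y) := by
    constructor
    · rintro ⟨he, hv⟩; exact ⟨hv.2.1, he⟩
    · rintro ⟨h01, he⟩; exact ⟨he, h0x, h01, hx, by omega⟩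
  have e4 : ((pvCell a (x, y + 1).1 (x, y + 1).2 = pvCell a x y) ∧
        (0 ≤ (x, y + 1).1 ∧ 0 ≤ (x, y + 1).2 ∧ (x, y + 1).1 < (a.length : Int) ∧
          (x, y + 1).2 < ((a.headD []).length : Int)))
      ↔ (y + 1 < ((a.headD []).length : Int) ∧ pvCell a x (y + 1) = pvCell a x y) := by
    constructor
    · rintro ⟨he, hv⟩; exact ⟨hv.2.2.2, he⟩
    · rintro ⟨h01, he⟩; exact ⟨he, h0x, by omega, hx, h01⟩
  simp only [e1, e2, e3, e4]
  split_ifs <;> norm_num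

-- ===== VERDICT (by name: the statement is the Claim_ definition above) =====
theorem isAssignmentValid_spec : Claim_equal_isAssignmentValid := by
  intro a s _ _
  unfold Spec_isAssignmentValid
  by_cases ha : a = []
  · subst ha
    simp [isAssignmentValid, isAssignmentValid_alt,
      PySem.List.pyRange_one_eq_nil (by norm_num : (0 : Int) ≤ 0)]
  · simp only [isAssignmentValid, isAssignmentValid_alt, ha, if_false]
    apply pvAllCongr
    intro x hx
    apply pvAllCongr
    intro y hy
    rw [PySem.List.mem_pyRange_one] at hx hy
    rw [pvCountsEq a (a.length : Int) ((a.headD []).length : Int),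
        PySem.Dict.getD_counter,
        pvCountBigInt a _ _ x y hx.1 hx.2 hy.1 hy.2]
    rw [pvCountA a x y hx.1 hx.2 hy.1 hy.2,
        pvIteAndEqComm (y + 1 < ((a.headD []).length : Int)) (pvCell a x (y + 1)) (pvCell a x y),
        pvIteAndEqComm (x + 1 < (a.length : Int)) (pvCell a (x + 1) y) (pvCell a x y)]
    by_cases hm : (x, y) ∈ s
    · have hc : PySem.Set.contains (PySem.Set.ofList s) (x, y) = true := by
        rw [PySem.Set.contains_iff, PySem.Set.mem_ofList]; exact hm
      simp [hm, hc]
    · have hc : PySem.Set.contains (PySem.Set.ofList s) (x, y) = false := by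
        rw [Bool.eq_false_iff]
        intro hcc
        rw [PySem.Set.contains_iff, PySem.Set.mem_ofList] at hcc
        exact hm hcc
      simp [hm, hc]
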